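-- pv_equiv track=rewrite | github.com/Aurora0601/Python-Cypto-tools | Playfair_off.py | decrypt_zigzag
-- ===== SOURCE A (Python) =====
-- def decrypt_zigzag(ciphertext, num_rows):
--     """使用曲路密码解密密文"""
--     if num_rows <= 1:
--         return ciphertext
--
--     # 计算每行的字符数（长度）
--     n = len(ciphertext)
--     row_lengths = [0] * num_rows
--     # 临时变量，用于模拟加密过程以计算每行长度
--     current_row = 0
--     going_down = False
--
--     # 计算每行应该有多少个字符
--     for i in range(n):
--         row_lengths[current_row] += 1
--         # 根据当前行决定下一步的方向
--         if current_row == 0: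
--             going_down = True
--         elif current_row == num_rows - 1:
--             going_down = False
--
--         current_row += 1 if going_down else -1
--
--     # 根据计算出的长度从密文中分割出每行的内容
--     index = 0
--     rows = [''] * num_rows
--     for i in range(num_rows):
--         rows[i] = ciphertext[index:index + row_lengths[i]]
--         index += row_lengths[i]
--
--     # 按照曲路排列重建明文
--     result = []
--     current_row = 0
--     going_down = False
--     for _ in range(n):  # 使用 _ 因为我们不需要循环变量，只关心循环次数
--         result.append(rows[current_row][0])
--         rows[current_row] = rows[current_row][1:]  # 移除已添加的字符
--         # 根据当前行决定下一步的方向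
--         if current_row == 0:
--             going_down = True
--         elif current_row == num_rows - 1:
--             going_down = False
--
--         current_row += 1 if going_down else -1
--
--     return ''.join(result)
-- ===== SOURCE B (Python) =====
-- def decrypt_zigzag(ciphertext, num_rows):
--     """Zigzag (rail-fence) decryption by scatter: the row of position i is
--     given by a closed-form formula (no zigzag simulation), and the output is
--     filled row by row, writing consecutive ciphertext characters into the
--     positions belonging to each row."""
--     if num_rows <= 1:
--         return ciphertext
--
--     n = len(ciphertext)
--     cycle = 2 * (num_rows - 1)
--     out = [''] * n
--     k = 0
--     for r in range(num_rows):
--         for i in range(n):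
--             m = i % cycle
--             if (m if m < num_rows else cycle - m) == r:
--                 out[i] = ciphertext[k]
--                 k += 1
--     return ''.join(out)
-- ===== Notes on version B (the rewrite author's own statement) =====
-- stated objective: alternative
-- what changed: B replaces A's two zigzag simulations and repeated string slicing by a closed-form row formula (i % cycle folded back) and a scatter pass: it iterates rows in order and writes consecutive ciphertext characters directly into the output positions of each row.
import Mathlib
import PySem

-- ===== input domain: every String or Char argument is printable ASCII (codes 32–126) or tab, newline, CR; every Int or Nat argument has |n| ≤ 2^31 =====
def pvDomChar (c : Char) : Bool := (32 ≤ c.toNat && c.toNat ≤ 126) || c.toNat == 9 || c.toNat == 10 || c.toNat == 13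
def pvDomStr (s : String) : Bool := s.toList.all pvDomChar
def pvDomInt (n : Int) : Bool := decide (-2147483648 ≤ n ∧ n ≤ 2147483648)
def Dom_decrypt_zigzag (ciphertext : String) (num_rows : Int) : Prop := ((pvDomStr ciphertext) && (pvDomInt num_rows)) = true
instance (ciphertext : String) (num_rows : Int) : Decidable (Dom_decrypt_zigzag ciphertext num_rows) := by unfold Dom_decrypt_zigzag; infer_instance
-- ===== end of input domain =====

-- B replaces A's zigzag simulations and repeated string slicing by a closed-form row
-- formula and a scatter pass writing consecutive ciphertext characters into each row's
-- positions (objective: alternative).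


-- ===== PORT A =====
-- first loop: row_lengths[current_row] += 1; direction update; move
def pvA_step1 (num_rows : Int) (st : List Int × Int × Bool) (_i : Int) : List Int × Int × Bool :=
  let rl := PySem.List.pySetD st.1 st.2.1 (PySem.List.pyGetD st.1 st.2.1 0 + 1)
  let gd := if st.2.1 == 0 then true else if st.2.1 == num_rows - 1 then false else st.2.2
  (rl, st.2.1 + (if gd then 1 else -1), gd)

-- second loop: rows[i] = ciphertext[index:index+row_lengths[i]]; index += row_lengths[i]
def pvA_step2 (cs : List Char) (rl : List Int) (st : Int × List (List Char)) (i : Int) :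
    Int × List (List Char) :=
  (st.1 + PySem.List.pyGetD rl i 0,
   PySem.List.pySetD st.2 i (PySem.List.slice cs (some st.1) (some (st.1 + PySem.List.pyGetD rl i 0))))

-- third loop: result.append(rows[r][0]); rows[r] = rows[r][1:]; direction update; move
-- (rows[r][0] is always in range when this loop runs; pyGetD's default is never returned)
def pvA_step3 (num_rows : Int) (st : List Char × List (List Char) × Int × Bool) (_i : Int) :
    List Char × List (List Char) × Int × Bool :=
  let r := st.2.2.1
  let row := PySem.List.pyGetD st.2.1 r []
  let gd := if r == 0 then true else if r == num_rows - 1 then false else st.2.2.2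
  (st.1 ++ [PySem.List.pyGetD row 0 ' '],
   PySem.List.pySetD st.2.1 r (PySem.List.slice row (some 1) none),
   r + (if gd then 1 else -1), gd)

def decrypt_zigzag (ciphertext : String) (num_rows : Int) : String :=
  if num_rows ≤ 1 then ciphertext
  else
    let cs := ciphertext.toList
    let n : Int := PySem.Str.len ciphertext
    let s1 := (PySem.List.pyRange 0 n 1).foldl (pvA_step1 num_rows)
      (PySem.List.pyRepeat [(0 : Int)] num_rows, 0, false)
    let s2 := (PySem.List.pyRange 0 num_rows 1).foldl (pvA_step2 cs s1.1)
      (0, PySem.List.pyRepeat [([] : List Char)] num_rows)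
    let s3 := (PySem.List.pyRange 0 n 1).foldl (pvA_step3 num_rows) ([], s2.2, 0, false)
    String.ofList s3.1

-- ===== PORT B =====
-- closed-form row of position i: m = i % cycle, folded back past the bottom row
def pvB_rowOf (num_rows cycle : Int) (i : Int) : Int :=
  let m := PySem.Int.mod i cycle
  if m < num_rows then m else cycle - m

-- inner loop body: if position i belongs to row r, write ciphertext[k] there and advance k
-- (k stays in range while the loops run; pyGetD's default is never returned)
def pvB_inner (cs : List Char) (num_rows cycle r : Int)
    (st : List (List Char) × Int) (i : Int) : List (List Char) × Int :=
  if pvB_rowOf num_rows cycle i == r then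
    (PySem.List.pySetD st.1 i [PySem.List.pyGetD cs st.2 ' '], st.2 + 1)
  else st

def decrypt_zigzag_alt (ciphertext : String) (num_rows : Int) : String :=
  if num_rows ≤ 1 then ciphertext
  else
    let cs := ciphertext.toList
    let n : Int := PySem.Str.len ciphertext
    let cycle := 2 * (num_rows - 1)
    let s := (PySem.List.pyRange 0 num_rows 1).foldl
      (fun st r => (PySem.List.pyRange 0 n 1).foldl (pvB_inner cs num_rows cycle r) st)
      (PySem.List.pyRepeat [([] : List Char)] n, 0)
    String.ofList s.1.flatten

-- ===== PRECONDITION & SPEC =====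
def Spec_decrypt_zigzag (ciphertext : String) (num_rows : Int) (out : String) : Prop := out = decrypt_zigzag_alt ciphertext num_rows
instance (ciphertext : String) (num_rows : Int) (out : String) : Decidable (Spec_decrypt_zigzag ciphertext num_rows out) := by unfold Spec_decrypt_zigzag; infer_instance

-- ===== CLAIM (what is proved, stated in full; the proofs are below) =====
def Claim_equal_decrypt_zigzag : Prop := ∀ (ciphertext : String) (num_rows : Int), Dom_decrypt_zigzag ciphertext num_rows → Spec_decrypt_zigzag ciphertext num_rows (decrypt_zigzag ciphertext num_rows)

-- ===== LEMMAS AND PROOFS =====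

-- ----- the zigzag state machine of A, and its closed form -----

def pvZig (R : Int) (cd : Int × Bool) : Int × Bool :=
  let gd := if cd.1 == 0 then true else if cd.1 == R - 1 then false else cd.2
  (cd.1 + (if gd then 1 else -1), gd)

def pvTraj (R : Int) : Int × Bool → Nat → List Int
  | _, 0 => []
  | cd, Nat.succ k => cd.1 :: pvTraj R (pvZig R cd) k

def pvRowN (Rn cy i : Nat) : Nat := if i % cy < Rn then i % cy else cy - i % cy
def pvGdN (Rn cy i : Nat) : Bool := decide (i % cy < Rn - 1)

theorem pv_row_lt (Rn cy : Nat) (h2 : 2 ≤ Rn) (hcy : cy = 2 * (Rn - 1)) (i : Nat) :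
    pvRowN Rn cy i < Rn := by
  have hm : i % cy < cy := Nat.mod_lt _ (by omega)
  unfold pvRowN
  split_ifs with h <;> omega

theorem pv_mod_succ (cy i : Nat) (h : 0 < cy) :
    (i + 1) % cy = if i % cy + 1 = cy then 0 else i % cy + 1 := by
  have hm : i % cy < cy := Nat.mod_lt _ h
  rcases Nat.lt_or_ge 1 cy with h1 | h1
  · have he : (i + 1) % cy = (i % cy + 1) % cy := by
      conv_lhs => rw [Nat.add_mod]
      rw [Nat.mod_eq_of_lt h1]
    rw [he]
    by_cases hh : i % cy + 1 = cy
    · simp [hh]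
    · rw [Nat.mod_eq_of_lt (by omega)]
      simp [hh]
  · have hcy1 : cy = 1 := by omega
    subst hcy1
    simp [Nat.mod_one]

theorem pv_zig_step (R : Int) (Rn cy : Nat) (hR : (Rn : Int) = R) (h2 : 2 ≤ Rn)
    (hcy : cy = 2 * (Rn - 1)) (i : Nat) (d : Bool)
    (hd : 0 < pvRowN Rn cy i → pvRowN Rn cy i + 1 < Rn → d = pvGdN Rn cy i) :
    pvZig R ((pvRowN Rn cy i : Int), d) = ((pvRowN Rn cy (i + 1) : Int), pvGdN Rn cy i) ∧
    (0 < pvRowN Rn cy (i + 1) → pvRowN Rn cy (i + 1) + 1 < Rn → pvGdN Rn cy i = pvGdN Rn cy (i + 1)) := by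
  have hcy0 : 0 < cy := by omega
  have hm : i % cy < cy := Nat.mod_lt _ hcy0
  have hms := pv_mod_succ cy i hcy0
  have hlt := pv_row_lt Rn cy h2 hcy i
  have hlt' := pv_row_lt Rn cy h2 hcy (i + 1)
  have hrowi : pvRowN Rn cy i = if i % cy < Rn then i % cy else cy - i % cy := rfl
  have hrowsi : pvRowN Rn cy (i + 1) = if (i + 1) % cy < Rn then (i + 1) % cy else cy - (i + 1) % cy := rfl
  refine ⟨?_, ?_⟩
  · -- one step of the machine
    have hgd : (if (pvRowN Rn cy i : Int) = 0 then true
        else if (pvRowN Rn cy i : Int) = R - 1 then false else d) = pvGdN Rn cy i := by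
      split_ifs with a b
      · symm
        simp only [pvGdN, decide_eq_true_eq]
        rw [hrowi] at a
        split_ifs at a <;> omega
      · symm
        simp only [pvGdN, decide_eq_false_iff_not]
        rw [hrowi] at b
        split_ifs at b <;> omega
      · refine hd ?_ ?_ <;> omega
    have hval : (pvRowN Rn cy i : Int) + (if pvGdN Rn cy i then 1 else -1) = (pvRowN Rn cy (i + 1) : Int) := by
      by_cases hcc : i % cy + 1 = cy
      · have hm1 : (i + 1) % cy = 0 := by rw [hms, if_pos hcc]
        by_cases hg : i % cy < Rn - 1
        · simp only [pvGdN, hg, decide_true, if_true]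
          rw [hrowi, hrowsi, hm1]
          split_ifs <;> push_cast <;> omega
        · simp only [pvGdN, hg, decide_false, Bool.false_eq_true, if_false]
          rw [hrowi, hrowsi, hm1]
          split_ifs <;> push_cast <;> omega
      · have hm1 : (i + 1) % cy = i % cy + 1 := by rw [hms, if_neg hcc]
        by_cases hg : i % cy < Rn - 1
        · simp only [pvGdN, hg, decide_true, if_true]
          rw [hrowi, hrowsi, hm1]
          split_ifs <;> push_cast <;> omega
        · simp only [pvGdN, hg, decide_false, Bool.false_eq_true, if_false]
          rw [hrowi, hrowsi, hm1]
          split_ifs <;> push_cast <;> omega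
    simp only [pvZig, beq_iff_eq]
    rw [hgd, hval]
  · -- direction carries into the next middle state
    intro ha hb
    rw [hrowsi, hms] at ha hb
    simp only [pvGdN, decide_eq_decide, hms]
    split_ifs at ha hb ⊢ <;> omega

theorem pv_traj_row (R : Int) (Rn cy : Nat) (hR : (Rn : Int) = R) (h2 : 2 ≤ Rn)
    (hcy : cy = 2 * (Rn - 1)) :
    ∀ (k i : Nat) (d : Bool),
      (0 < pvRowN Rn cy i → pvRowN Rn cy i + 1 < Rn → d = pvGdN Rn cy i) →
      pvTraj R ((pvRowN Rn cy i : Int), d) k = (List.range k).map (fun j => (pvRowN Rn cy (i + j) : Int)) := by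
  intro k
  induction k with
  | zero => intro i d _; simp [pvTraj]
  | succ k ih =>
    intro i d hd
    obtain ⟨hstep, hcarry⟩ := pv_zig_step R Rn cy hR h2 hcy i d hd
    simp only [pvTraj, hstep, List.range_succ_eq_map, List.map_cons, List.map_map]
    refine List.cons_eq_cons.mpr ⟨by simp, ?_⟩
    rw [ih (i + 1) _ hcarry]
    refine List.map_congr_left fun j _ => ?_
    simp [Function.comp]
    ring_nf

theorem pv_pattern (R : Int) (Rn cy : Nat) (hR : (Rn : Int) = R) (h2 : 2 ≤ Rn)
    (hcy : cy = 2 * (Rn - 1)) (n : Nat) :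
    pvTraj R (0, false) n = (List.range n).map (fun j => (pvRowN Rn cy j : Int)) := by
  have h0 : pvRowN Rn cy 0 = 0 := by unfold pvRowN; simp [Nat.zero_mod]; omega
  have := pv_traj_row R Rn cy hR h2 hcy n 0 false (by rw [h0]; omega)
  rw [h0] at this
  simpa using this

-- ----- counting helpers -----

def pvCntN (Rn cy r m : Nat) : Nat := ((List.range m).filter (fun j => pvRowN Rn cy j = r)).length
def pvStartN (Rn cy n r : Nat) : Nat := ((List.range n).filter (fun j => pvRowN Rn cy j < r)).length
def pvSigN (Rn cy n t : Nat) : Nat :=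
  pvStartN Rn cy n (pvRowN Rn cy t) + pvCntN Rn cy (pvRowN Rn cy t) t

theorem pv_count_filter (Rn cy r : Nat) : ∀ (l : List Nat),
    (l.map (fun j => (pvRowN Rn cy j : Int))).count ((r : Nat) : Int) =
      (l.filter (fun j => pvRowN Rn cy j = r)).length := by
  intro l
  induction l with
  | nil => simp
  | cons x t ih =>
    simp only [List.map_cons, List.count_cons, List.filter_cons, ih]
    by_cases h : pvRowN Rn cy x = r
    · simp [h]
    · have : ¬ (((pvRowN Rn cy x : Nat) : Int) == ((r : Nat) : Int)) = true := by
        simpa using fun hh => h (by exact_mod_cast hh)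
      simp [h, this]

theorem pv_filter_split (Rn cy r : Nat) : ∀ (l : List Nat),
    (l.filter (fun j => pvRowN Rn cy j < r + 1)).length =
      (l.filter (fun j => pvRowN Rn cy j < r)).length +
      (l.filter (fun j => pvRowN Rn cy j = r)).length := by
  intro l
  induction l with
  | nil => simp
  | cons x t ih =>
    simp only [List.filter_cons]
    split_ifs <;> simp_all <;> omega

-- ----- A's first loop: row lengths = counts over the pattern -----

def pvBump (rl : List Int) (r : Int) : List Int :=
  PySem.List.pySetD rl r (PySem.List.pyGetD rl r 0 + 1)

theorem pv_loopA1 (R : Int) : ∀ (l : List Int) (rl : List Int) (c : Int) (d : Bool),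
    (l.foldl (pvA_step1 R) (rl, c, d)).1 = (pvTraj R (c, d) l.length).foldl pvBump rl := by
  intro l
  induction l with
  | nil => intro rl c d; rfl
  | cons x t ih =>
    intro rl c d
    simp only [List.foldl_cons, List.length_cons, pvTraj, pvA_step1]
    exact ih _ _ _

theorem pvBump_get : ∀ (Q : List Int) (z : List Int),
    (∀ r ∈ Q, ∃ j : Nat, r = (j : Int) ∧ j < z.length) →
    ∀ i : Nat, i < z.length →
      PySem.List.pyGetD (Q.foldl pvBump z) (i : Int) 0 =
        PySem.List.pyGetD z (i : Int) 0 + (Q.count (i : Int) : Int) := by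
  intro Q
  induction Q with
  | nil => intro z _ i _; simp
  | cons r t ih =>
    intro z hQ i hi
    obtain ⟨j, rfl, hj⟩ := hQ r (List.mem_cons_self)
    have hlen : (pvBump z (j : Int)).length = z.length := by simp [pvBump]
    rw [List.foldl_cons, ih (pvBump z (j : Int))
      (by rw [hlen]; exact fun r hr => hQ r (List.mem_cons_of_mem _ hr)) i (by omega)]
    simp only [pvBump, PySem.List.pySetD_natCast, PySem.List.pyGetD_natCast,
      List.getD_eq_getElem?_getD, List.getElem?_set, List.count_cons]
    by_cases h : i = j
    · subst h
      simp [hj]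
      ring
    · have : ¬ ((j : Int) == (i : Int)) = true := by
        simpa using fun hh => h (by exact_mod_cast hh.symm)
      have hji : ¬ j = i := fun hh => h hh.symm
      simp [this, hji]

-- ----- A's second loop: rows are consecutive slices at the prefix sums -----

def pvSum (rl : List Int) : Nat → Int
  | 0 => 0
  | Nat.succ m => pvSum rl m + PySem.List.pyGetD rl (m : Int) 0

theorem pv_loopA2 (cs : List Char) (rl : List Int) (Rn : Nat) :
    ∀ m : Nat, m ≤ Rn →
      ((PySem.List.pyRange 0 (m : Int) 1).foldl (pvA_step2 cs rl) (0, List.replicate Rn ([] : List Char))).1 = pvSum rl m ∧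
      ((PySem.List.pyRange 0 (m : Int) 1).foldl (pvA_step2 cs rl) (0, List.replicate Rn ([] : List Char))).2.length = Rn ∧
      ∀ i : Nat, i < Rn →
        PySem.List.pyGetD ((PySem.List.pyRange 0 (m : Int) 1).foldl (pvA_step2 cs rl) (0, List.replicate Rn ([] : List Char))).2 (i : Int) [] =
          if i < m then PySem.List.slice cs (some (pvSum rl i)) (some (pvSum rl i + PySem.List.pyGetD rl (i : Int) 0)) else [] := by
  intro m
  induction m with
  | zero =>
    intro _
    refine ⟨by simp [PySem.List.pyRange_zero, pvSum], by simp [PySem.List.pyRange_zero], ?_⟩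
    intro i hi
    simp [List.getD_eq_getElem?_getD, hi]
  | succ m ih =>
    intro hm
    have hm' : m ≤ Rn := by omega
    obtain ⟨h1, h2, h3⟩ := ih hm'
    have hr : PySem.List.pyRange 0 ((m : Nat) + 1 : Int) 1 =
        PySem.List.pyRange 0 (m : Int) 1 ++ [(m : Int)] := by
      simpa using PySem.List.pyRange_one_succ_right (a := 0) (b := (m : Int)) (by positivity)
    rw [show ((m + 1 : Nat) : Int) = ((m : Nat) + 1 : Int) by push_cast; ring, hr, List.foldl_append]
    set st := (PySem.List.pyRange 0 (m : Int) 1).foldl (pvA_step2 cs rl) (0, List.replicate Rn ([] : List Char)) with hst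
    simp only [List.foldl_cons, List.foldl_nil, pvA_step2]
    refine ⟨by rw [h1]; rfl, by simpa [h2] using hm, ?_⟩
    intro i hi
    rw [h1]
    have hmlt : m < st.2.length := by rw [h2]; omega
    simp only [PySem.List.pySetD_natCast, PySem.List.pyGetD_natCast,
      List.getD_eq_getElem?_getD, List.getElem?_set]
    by_cases h : i = m
    · subst h
      simp [hmlt]
    · have h3i := h3 i hi
      simp only [PySem.List.pyGetD_natCast, List.getD_eq_getElem?_getD] at h3i
      have hmi : ¬ m = i := fun hh => h hh.symm
      rw [if_neg hmi, h3i]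
      by_cases hlt : i < m
      · rw [if_pos hlt, if_pos (by omega)]
      · rw [if_neg hlt, if_neg (by omega)]

-- ----- A's third loop: rows replay coupled with per-row pointers -----

def pvRowsStep (st : List Char × List (List Char)) (r : Int) : List Char × List (List Char) :=
  let row := PySem.List.pyGetD st.2 r []
  (st.1 ++ [PySem.List.pyGetD row 0 ' '],
   PySem.List.pySetD st.2 r (PySem.List.slice row (some 1) none))

def pvPtrStep (cs : List Char) (st : List Char × List Int) (r : Int) : List Char × List Int :=
  (st.1 ++ [PySem.List.pyGetD cs (PySem.List.pyGetD st.2 r 0) ' '],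
   PySem.List.pySetD st.2 r (PySem.List.pyGetD st.2 r 0 + 1))

theorem pv_loopA3 (R : Int) : ∀ (l : List Int) (res : List Char) (rows : List (List Char)) (c : Int) (d : Bool),
    (l.foldl (pvA_step3 R) (res, rows, c, d)).1 = ((pvTraj R (c, d) l.length).foldl pvRowsStep (res, rows)).1 := by
  intro l
  induction l with
  | nil => intro res rows c d; rfl
  | cons x t ih =>
    intro res rows c d
    simp only [List.foldl_cons, List.length_cons, pvTraj, pvA_step3]
    exact ih _ _ _ _

theorem pv_head_piece (cs : List Char) (p k : Nat) (d : Char) :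
    (((cs.drop p).take (k + 1)).getD 0 d) = cs.getD p d := by
  simp only [List.getD_eq_getElem?_getD, List.getElem?_take_of_lt (Nat.succ_pos k), List.getElem?_drop, Nat.add_zero]

theorem pv_tail_take {α : Type} (l : List α) (n : Nat) : (l.take (n+1)).tail = l.tail.take n := by
  induction l <;> simp

theorem pv_couple (cs : List Char) (Rn : Nat) :
    ∀ (Q : List Int) (res : List Char) (rows : List (List Char)) (ptr : List Int),
      rows.length = Rn → ptr.length = Rn →
      (∀ r ∈ Q, ∃ j : Nat, r = (j : Int) ∧ j < Rn) →
      (∀ i : Nat, i < Rn → ∃ p : Nat,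
        PySem.List.pyGetD ptr (i : Int) 0 = (p : Int) ∧
        PySem.List.pyGetD rows (i : Int) [] = (cs.drop p).take (Q.count (i : Int))) →
      (Q.foldl pvRowsStep (res, rows)).1 = (Q.foldl (pvPtrStep cs) (res, ptr)).1 := by
  intro Q
  induction Q with
  | nil => intro res rows ptr _ _ _ _; rfl
  | cons r t ih =>
    intro res rows ptr hrows hptr hQ hinv
    obtain ⟨j, rfl, hj⟩ := hQ _ (List.mem_cons_self)
    obtain ⟨p, hp, hrow⟩ := hinv j hj
    have hjrows : j < rows.length := by omega
    have hjptr : j < ptr.length := by omega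
    have hrow' : PySem.List.pyGetD rows (j : Int) [] = (cs.drop p).take (t.count (j : Int) + 1) := by
      rw [hrow]; simp
    have hhead : PySem.List.pyGetD (PySem.List.pyGetD rows (j : Int) []) 0 ' ' =
        PySem.List.pyGetD cs (PySem.List.pyGetD ptr (j : Int) 0) ' ' := by
      rw [hp, hrow', PySem.List.pyGetD_zero, PySem.List.pyGetD_natCast, pv_head_piece]
    have eA : pvRowsStep (res, rows) (j : Int) =
        (res ++ [PySem.List.pyGetD cs (PySem.List.pyGetD ptr (j : Int) 0) ' '],
         rows.set j ((cs.drop (p+1)).take (t.count (j : Int)))) := by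
      simp only [pvRowsStep, hhead, PySem.List.pySetD_natCast]
      rw [hrow', PySem.List.slice_from_one, pv_tail_take, List.tail_drop]
    have eB : pvPtrStep cs (res, ptr) (j : Int) =
        (res ++ [PySem.List.pyGetD cs (PySem.List.pyGetD ptr (j : Int) 0) ' '],
         ptr.set j ((p : Int) + 1)) := by
      simp only [pvPtrStep, hp, PySem.List.pySetD_natCast]
    rw [List.foldl_cons, List.foldl_cons, eA, eB]
    apply ih
    · simp [hrows]
    · simp [hptr]
    · exact fun r hr => hQ r (List.mem_cons_of_mem _ hr)
    · intro i hi
      by_cases h : i = j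
      · subst h
        refine ⟨p + 1, ?_, ?_⟩
        · simp only [PySem.List.pyGetD_natCast, List.getD_eq_getElem?_getD, List.getElem?_set]
          simp [hjptr]
        · simp only [PySem.List.pyGetD_natCast, List.getD_eq_getElem?_getD, List.getElem?_set]
          simp [hjrows]
      · obtain ⟨q, hq, hrq⟩ := hinv i hi
        refine ⟨q, ?_, ?_⟩
        · simp only [PySem.List.pyGetD_natCast, List.getD_eq_getElem?_getD, List.getElem?_set] at hq ⊢
          rw [if_neg (fun hh => h hh.symm)]
          exact hq
        · simp only [PySem.List.pyGetD_natCast, List.getD_eq_getElem?_getD, List.getElem?_set] at hrq ⊢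
          rw [if_neg (fun hh => h hh.symm), hrq]
          have : ((j : Int) :: t).count (i : Int) = t.count (i : Int) := by
            rw [List.count_cons]
            have : ¬ ((j : Int) == (i : Int)) = true := by
              simpa using fun hh => h ((by exact_mod_cast hh : j = i)).symm
            simp [this]
          rw [← this]

def pvNsum (Q : List Int) : Nat → Nat
  | 0 => 0
  | Nat.succ m => pvNsum Q m + Q.count (m : Int)

theorem pv_sum_cast (rl : List Int) (Q : List Int) (Rn : Nat)
    (hC : ∀ i : Nat, i < Rn → PySem.List.pyGetD rl (i : Int) 0 = (Q.count (i : Int) : Int)) :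
    ∀ i : Nat, i ≤ Rn → pvSum rl i = (pvNsum Q i : Int) := by
  intro i
  induction i with
  | zero => intro _; rfl
  | succ m ih =>
    intro hm
    rw [show pvSum rl (m+1) = pvSum rl m + PySem.List.pyGetD rl (m : Int) 0 from rfl,
      ih (by omega), hC m (by omega), show pvNsum Q (m+1) = pvNsum Q m + Q.count (m : Int) from rfl]
    push_cast
    ring

theorem pv_nsum_start (Rn cy n : Nat) :
    ∀ i : Nat, pvNsum ((List.range n).map (fun j => (pvRowN Rn cy j : Int))) i = pvStartN Rn cy n i := by
  intro i
  induction i with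
  | zero => simp [pvNsum, pvStartN, List.filter_eq_nil_iff]
  | succ m ih =>
    rw [show pvNsum _ (m+1) = pvNsum _ m + _ from rfl, ih, pv_count_filter]
    unfold pvStartN
    rw [pv_filter_split]

-- ----- pointer replay unrolled to a gather formula -----

def pvScan (cs : List Char) : List Int → List Int → List Char
  | [], _ => []
  | r :: t, ptr =>
      PySem.List.pyGetD cs (PySem.List.pyGetD ptr r 0) ' ' ::
        pvScan cs t (PySem.List.pySetD ptr r (PySem.List.pyGetD ptr r 0 + 1))

theorem pv_replay_scan (cs : List Char) :
    ∀ (Q : List Int) (res : List Char) (ptr : List Int),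
      (Q.foldl (pvPtrStep cs) (res, ptr)).1 = res ++ pvScan cs Q ptr := by
  intro Q
  induction Q with
  | nil => intro res ptr; simp [pvScan]
  | cons r t ih =>
    intro res ptr
    rw [List.foldl_cons, pvScan]
    show (t.foldl (pvPtrStep cs) (res ++ [_], _)).1 = _
    rw [ih]
    simp

theorem pv_scan_formula (cs : List Char) :
    ∀ (Q : List Int) (ptr : List Int),
      (∀ r ∈ Q, ∃ j : Nat, r = (j : Int) ∧ j < ptr.length) →
      pvScan cs Q ptr = (List.range Q.length).map (fun t =>
        PySem.List.pyGetD cs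
          (PySem.List.pyGetD ptr (Q.getD t 0) 0 + ((Q.take t).count (Q.getD t 0) : Int)) ' ') := by
  intro Q
  induction Q with
  | nil => intro ptr _; simp [pvScan]
  | cons r t ih =>
    intro ptr hQ
    obtain ⟨j, rfl, hj⟩ := hQ _ (List.mem_cons_self)
    rw [pvScan, List.length_cons, List.range_succ_eq_map, List.map_cons, List.map_map]
    refine List.cons_eq_cons.mpr ⟨by simp, ?_⟩
    · rw [ih _ (by
        intro r hr
        obtain ⟨q, rfl, hq⟩ := hQ r (List.mem_cons_of_mem _ hr)
        exact ⟨q, rfl, by simpa using hq⟩)]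
      refine List.map_congr_left fun s hs => ?_
      simp only [List.mem_range] at hs
      simp only [Function.comp]
      have hg : ((j : Int) :: t).getD (s + 1) 0 = t.getD s 0 := rfl
      rw [hg]
      have hmem : t.getD s 0 ∈ t := by
        rw [List.getD_eq_getElem _ _ hs]
        exact List.getElem_mem _
      obtain ⟨q, hq, hqlt⟩ := hQ (t.getD s 0) (List.mem_cons_of_mem _ hmem)
      rw [hq]
      have hptr : PySem.List.pyGetD (PySem.List.pySetD ptr (j : Int) (PySem.List.pyGetD ptr (j : Int) 0 + 1)) ((q : Nat) : Int) 0 =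
          PySem.List.pyGetD ptr ((q : Nat) : Int) 0 + (if q = j then 1 else 0) := by
        simp only [PySem.List.pySetD_natCast, PySem.List.pyGetD_natCast,
          List.getD_eq_getElem?_getD, List.getElem?_set]
        by_cases h : q = j
        · subst h; simp [hj]
        · have hji : ¬ j = q := fun hh => h hh.symm
          simp [hji, h]
      have hcnt : (((j : Int) :: t).take (s + 1)).count ((q : Nat) : Int) =
          (t.take s).count ((q : Nat) : Int) + (if q = j then 1 else 0) := by
        rw [List.take_succ_cons, List.count_cons]
        by_cases h : q = j
        · subst h; simp
        · have hbq : ¬ ((j : Int) == ((q : Nat) : Int)) = true := by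
            simpa using fun hh => h (by exact_mod_cast hh.symm)
          simp [hbq, h]
      rw [hptr, hcnt]
      congr 1
      split_ifs <;> push_cast <;> ring

-- ----- B's loops: the scatter fills position j with ciphertext[σ(j)] -----

theorem pv_rowOf_cast (R : Int) (Rn cy : Nat) (hR : (Rn : Int) = R) (h2 : 2 ≤ Rn)
    (hcy : cy = 2 * (Rn - 1)) (j : Nat) :
    pvB_rowOf R (2 * (R - 1)) ((j : Nat) : Int) = (pvRowN Rn cy j : Int) := by
  have hcyI : (2 * (R - 1) : Int) = ((cy : Nat) : Int) := by push_cast [hcy]; omega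
  have hm : j % cy < cy := Nat.mod_lt _ (by omega)
  unfold pvB_rowOf pvRowN
  rw [hcyI, PySem.Int.mod_natCast]
  split_ifs with h1 h2' h3 <;> push_cast at * <;> omega

def pvBInnerFold (cs : List Char) (R : Int) (r : Int) (O0 : List (List Char)) (k0 : Int) (m : Nat) :
    List (List Char) × Int :=
  (PySem.List.pyRange 0 (m : Int) 1).foldl (pvB_inner cs R (2 * (R - 1)) r) (O0, k0)

theorem pvBInnerFold_succ (cs : List Char) (R : Int) (r : Int) (O0 : List (List Char)) (k0 : Int) (m : Nat) :
    pvBInnerFold cs R r O0 k0 (m + 1) =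
      pvB_inner cs R (2 * (R - 1)) r (pvBInnerFold cs R r O0 k0 m) ((m : Nat) : Int) := by
  unfold pvBInnerFold
  rw [show ((m + 1 : Nat) : Int) = ((m : Nat) + 1 : Int) by push_cast; ring,
    PySem.List.pyRange_one_succ_right (a := 0) (b := (m : Int)) (by positivity), List.foldl_append]
  simp

theorem pv_loopB_inner (cs : List Char) (R : Int) (Rn cy n : Nat) (hR : (Rn : Int) = R)
    (h2 : 2 ≤ Rn) (hcy : cy = 2 * (Rn - 1)) (r : Nat) (O0 : List (List Char))
    (hlen : O0.length = n)
    (hO0 : ∀ j : Nat, j < n → O0.getD j [] =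
      if pvRowN Rn cy j < r then [PySem.List.pyGetD cs ((pvSigN Rn cy n j : Nat) : Int) ' '] else []) :
    ∀ m : Nat, m ≤ n →
      (pvBInnerFold cs R ((r : Nat) : Int) O0 ((pvStartN Rn cy n r : Nat) : Int) m).2 =
        ((pvStartN Rn cy n r + pvCntN Rn cy r m : Nat) : Int) ∧
      (pvBInnerFold cs R ((r : Nat) : Int) O0 ((pvStartN Rn cy n r : Nat) : Int) m).1.length = n ∧
      ∀ j : Nat, j < n →
        (pvBInnerFold cs R ((r : Nat) : Int) O0 ((pvStartN Rn cy n r : Nat) : Int) m).1.getD j [] =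
          if pvRowN Rn cy j < r ∨ (pvRowN Rn cy j = r ∧ j < m)
          then [PySem.List.pyGetD cs ((pvSigN Rn cy n j : Nat) : Int) ' '] else [] := by
  intro m
  induction m with
  | zero =>
    intro _
    have hz : pvBInnerFold cs R ((r : Nat) : Int) O0 ((pvStartN Rn cy n r : Nat) : Int) 0 =
        (O0, ((pvStartN Rn cy n r : Nat) : Int)) := by
      unfold pvBInnerFold
      simp [PySem.List.pyRange_zero]
    rw [hz]
    refine ⟨by simp [pvCntN], hlen, ?_⟩
    intro j hj
    rw [hO0 j hj]
    by_cases h : pvRowN Rn cy j < r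
    · simp [h]
    · simp [h]
  | succ m ih =>
    intro hm
    obtain ⟨h1, h2l, h3⟩ := ih (by omega)
    rw [pvBInnerFold_succ]
    generalize pvBInnerFold cs R ((r : Nat) : Int) O0 ((pvStartN Rn cy n r : Nat) : Int) m = st0 at h1 h2l h3 ⊢
    have hrow := pv_rowOf_cast R Rn cy hR h2 hcy m
    have hcond : (pvB_rowOf R (2 * (R - 1)) ((m : Nat) : Int) == ((r : Nat) : Int)) =
        decide (pvRowN Rn cy m = r) := by
      rw [hrow]
      by_cases h : pvRowN Rn cy m = r
      · simp [h]
      · simp [h]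
    have hcnt_succ : pvCntN Rn cy r (m + 1) =
        pvCntN Rn cy r m + (if pvRowN Rn cy m = r then 1 else 0) := by
      unfold pvCntN
      rw [List.range_succ, List.filter_append]
      by_cases h : pvRowN Rn cy m = r <;> simp [h]
    simp only [pvB_inner, hcond]
    by_cases hmr : pvRowN Rn cy m = r
    · simp only [hmr, decide_true, if_true]
      have hsig : pvSigN Rn cy n m = pvStartN Rn cy n r + pvCntN Rn cy r m := by
        unfold pvSigN
        rw [hmr]
      refine ⟨?_, ?_, ?_⟩
      · show st0.2 + 1 = ((pvStartN Rn cy n r + pvCntN Rn cy r (m + 1) : Nat) : Int)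
        rw [h1, hcnt_succ, if_pos hmr]
        push_cast
        ring
      · show (PySem.List.pySetD st0.1 ((m : Nat) : Int) [PySem.List.pyGetD cs st0.2 ' ']).length = n
        simp [h2l]
      · intro j hj
        show (PySem.List.pySetD st0.1 ((m : Nat) : Int) [PySem.List.pyGetD cs st0.2 ' ']).getD j [] = _
        rw [h1]
        simp only [PySem.List.pySetD_natCast, List.getD_eq_getElem?_getD, List.getElem?_set]
        by_cases h : j = m
        · subst h
          have hlt : j < st0.1.length := by omega
          rw [if_pos (Or.inr ⟨hmr, by omega⟩), hsig]
          simp [hlt]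
        · have h3j := h3 j hj
          simp only [List.getD_eq_getElem?_getD] at h3j ⊢
          rw [if_neg (fun hh => h hh.symm), h3j]
          by_cases hc : pvRowN Rn cy j < r ∨ (pvRowN Rn cy j = r ∧ j < m)
          · rw [if_pos hc, if_pos (by rcases hc with hc | hc; exact Or.inl hc; exact Or.inr ⟨hc.1, by omega⟩)]
          · rw [if_neg hc, if_neg (by
              rintro (hc' | ⟨hc1, hc2⟩)
              · exact hc (Or.inl hc')
              · exact hc (Or.inr ⟨hc1, by omega⟩))]
    · simp only [hmr, decide_false, Bool.false_eq_true, if_false]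
      refine ⟨?_, h2l, ?_⟩
      · show st0.2 = ((pvStartN Rn cy n r + pvCntN Rn cy r (m + 1) : Nat) : Int)
        rw [h1, hcnt_succ, if_neg hmr]
        norm_num
      · intro j hj
        rw [h3 j hj]
        by_cases hc : pvRowN Rn cy j < r ∨ (pvRowN Rn cy j = r ∧ j < m)
        · rw [if_pos hc, if_pos (by rcases hc with hc | hc; exact Or.inl hc; exact Or.inr ⟨hc.1, by omega⟩)]
        · rw [if_neg hc, if_neg (by
            rintro (hc' | ⟨hc1, hc2⟩)
            · exact hc (Or.inl hc')
            · have hjm : j ≠ m := fun hh => hmr (hh ▸ hc1)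
              exact hc (Or.inr ⟨hc1, by omega⟩))]

def pvBOuterFold (cs : List Char) (R : Int) (n : Nat) (r : Nat) : List (List Char) × Int :=
  (PySem.List.pyRange 0 (r : Int) 1).foldl
    (fun st rr => (PySem.List.pyRange 0 (n : Int) 1).foldl (pvB_inner cs R (2 * (R - 1)) rr) st)
    (List.replicate n ([] : List Char), 0)

theorem pvBOuterFold_succ (cs : List Char) (R : Int) (n : Nat) (r : Nat) :
    pvBOuterFold cs R n (r + 1) =
      (PySem.List.pyRange 0 (n : Int) 1).foldl
        (pvB_inner cs R (2 * (R - 1)) ((r : Nat) : Int)) (pvBOuterFold cs R n r) := by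
  unfold pvBOuterFold
  rw [show ((r + 1 : Nat) : Int) = ((r : Nat) + 1 : Int) by push_cast; ring,
    PySem.List.pyRange_one_succ_right (a := 0) (b := (r : Int)) (by positivity), List.foldl_append]
  simp

theorem pv_loopB_outer (cs : List Char) (R : Int) (Rn cy n : Nat) (hR : (Rn : Int) = R)
    (h2 : 2 ≤ Rn) (hcy : cy = 2 * (Rn - 1)) :
    ∀ r : Nat, r ≤ Rn →
      (pvBOuterFold cs R n r).2 = ((pvStartN Rn cy n r : Nat) : Int) ∧
      (pvBOuterFold cs R n r).1.length = n ∧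
      ∀ j : Nat, j < n → (pvBOuterFold cs R n r).1.getD j [] =
        if pvRowN Rn cy j < r then [PySem.List.pyGetD cs ((pvSigN Rn cy n j : Nat) : Int) ' '] else [] := by
  intro r
  induction r with
  | zero =>
    intro _
    have hz : pvBOuterFold cs R n 0 = (List.replicate n ([] : List Char), 0) := by
      unfold pvBOuterFold
      simp [PySem.List.pyRange_zero]
    rw [hz]
    refine ⟨?_, by simp, ?_⟩
    · have : pvStartN Rn cy n 0 = 0 := by
        unfold pvStartN
        simp
      rw [this]
      simp
    · intro j hj
      simp [List.getD_eq_getElem?_getD, hj]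
  | succ r ih =>
    intro hr
    obtain ⟨h1, h2l, h3⟩ := ih (by omega)
    rw [pvBOuterFold_succ]
    have hsplit : pvBOuterFold cs R n r = ((pvBOuterFold cs R n r).1, ((pvStartN Rn cy n r : Nat) : Int)) := by
      rw [← h1]
    rw [hsplit]
    have hinner := pv_loopB_inner cs R Rn cy n hR h2 hcy r (pvBOuterFold cs R n r).1 h2l h3 n le_rfl
    rw [show (PySem.List.pyRange 0 ((n : Nat) : Int) 1).foldl
        (pvB_inner cs R (2 * (R - 1)) ((r : Nat) : Int)) ((pvBOuterFold cs R n r).1, ((pvStartN Rn cy n r : Nat) : Int)) =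
        pvBInnerFold cs R ((r : Nat) : Int) (pvBOuterFold cs R n r).1 ((pvStartN Rn cy n r : Nat) : Int) n from rfl]
    obtain ⟨k1, k2, k3⟩ := hinner
    have hstart_succ : pvStartN Rn cy n (r + 1) = pvStartN Rn cy n r + pvCntN Rn cy r n := by
      unfold pvStartN pvCntN
      exact pv_filter_split Rn cy r (List.range n)
    refine ⟨by rw [k1, hstart_succ], k2, ?_⟩
    intro j hj
    rw [k3 j hj]
    have hjRn := pv_row_lt Rn cy h2 hcy j
    by_cases hc : pvRowN Rn cy j < r + 1
    · rw [if_pos (by omega : pvRowN Rn cy j < r ∨ (pvRowN Rn cy j = r ∧ j < n)), if_pos hc]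
    · rw [if_neg (by omega), if_neg hc]

theorem pv_flatten_singleton {α β : Type} (f : α → β) : ∀ (l : List α),
    (l.map (fun x => [f x])).flatten = l.map f := by
  intro l
  induction l with
  | nil => rfl
  | cons x t ih => simp [ih]

-- ----- main equivalence -----

theorem pv_main (ct : String) (R : Int) :
    decrypt_zigzag ct R = decrypt_zigzag_alt ct R := by
  by_cases hRle : R ≤ 1
  · simp [decrypt_zigzag, decrypt_zigzag_alt, hRle]
  · have h2I : 2 ≤ R := by omega
    obtain ⟨Rn, hR⟩ : ∃ Rn : Nat, (Rn : Int) = R := ⟨R.toNat, Int.toNat_of_nonneg (by omega)⟩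
    have h2 : 2 ≤ Rn := by omega
    have hRtoNat : R.toNat = Rn := by omega
    set cy := 2 * (Rn - 1) with hcydef
    set cs := ct.toList with hcs
    set n := cs.length with hN
    have hn : PySem.Str.len ct = (n : Int) := by simp [hN, hcs]
    have hlen1 : (PySem.List.pyRange 0 (PySem.Str.len ct) 1).length = n := by
      rw [PySem.List.length_pyRange_one, hn]; simp
    set P := (List.range n).map (fun j => (pvRowN Rn cy j : Int)) with hPdef
    have hPat : pvTraj R (0, false) n = P := pv_pattern R Rn cy hR h2 rfl n
    have hPmem : ∀ r ∈ P, ∃ j : Nat, r = (j : Int) ∧ j < Rn := by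
      intro r hr
      rw [hPdef] at hr
      obtain ⟨j, _, rfl⟩ := List.mem_map.mp hr
      exact ⟨pvRowN Rn cy j, rfl, pv_row_lt Rn cy h2 rfl j⟩
    -- A's side
    simp only [decrypt_zigzag, if_neg hRle, PySem.List.pyRepeat_singleton]
    rw [hRtoNat, pv_loopA1, hlen1, hPat]
    set rl := P.foldl pvBump (List.replicate Rn (0 : Int)) with hrl
    have hC : ∀ i : Nat, i < Rn → PySem.List.pyGetD rl (i : Int) 0 = (P.count (i : Int) : Int) := by
      intro i hi
      rw [hrl, pvBump_get P _ (by simpa using hPmem) i (by simpa using hi)]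
      simp [List.getD_eq_getElem?_getD, hi]
    have hsum := pv_sum_cast rl P Rn hC
    have hA2' := pv_loopA2 cs rl Rn Rn le_rfl
    rw [show PySem.List.pyRange 0 R 1 = PySem.List.pyRange 0 ((Rn : Nat) : Int) 1 by rw [hR]]
    rw [pv_loopA3, hlen1, hPat]
    -- couple the rows replay with pointer replay
    set ptr0 := (List.range Rn).map (fun i => ((pvNsum P i : Nat) : Int)) with hptr0
    have hptr0len : ptr0.length = Rn := by simp [hptr0]
    have hptr0get : ∀ i : Nat, i < Rn → PySem.List.pyGetD ptr0 (i : Int) 0 = ((pvNsum P i : Nat) : Int) := by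
      intro i hi
      simp only [hptr0, PySem.List.pyGetD_natCast, List.getD_eq_getElem?_getD, List.getElem?_map]
      simp [hi]
    have hcouple := pv_couple cs Rn P [] _ ptr0 hA2'.2.1 hptr0len hPmem (by
      intro i hi
      refine ⟨pvNsum P i, hptr0get i hi, ?_⟩
      rw [hA2'.2.2 i hi, if_pos hi, hsum i (by omega), hC i hi, PySem.List.slice_natCast_add])
    rw [hcouple, pv_replay_scan, List.nil_append,
      pv_scan_formula cs P ptr0 (by rw [hptr0len]; exact hPmem)]
    -- B's side
    simp only [decrypt_zigzag_alt, if_neg hRle, PySem.List.pyRepeat_singleton, hn,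
      Int.toNat_natCast]
    rw [show PySem.List.pyRange 0 R 1 = PySem.List.pyRange 0 ((Rn : Nat) : Int) 1 by rw [hR]]
    have hBdef : (PySem.List.pyRange 0 ((Rn : Nat) : Int) 1).foldl
        (fun st r => (PySem.List.pyRange 0 ((n : Nat) : Int) 1).foldl
          (pvB_inner cs R (2 * (R - 1)) r) st)
        (List.replicate n ([] : List Char), 0) = pvBOuterFold cs R n Rn := rfl
    rw [hBdef]
    obtain ⟨_, hBlen, hBget⟩ := pv_loopB_outer cs R Rn cy n hR h2 rfl Rn le_rfl
    have hBfin : (pvBOuterFold cs R n Rn).1 =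
        (List.range n).map (fun j => [PySem.List.pyGetD cs ((pvSigN Rn cy n j : Nat) : Int) ' ']) := by
      apply List.ext_getElem
      · simp [hBlen]
      · intro j hj1 hj2
        have hjn : j < n := by simpa [hBlen] using hj1
        have hgj := hBget j hjn
        rw [if_pos (pv_row_lt Rn cy h2 rfl j)] at hgj
        simp only [List.getD_eq_getElem?_getD, List.getElem?_eq_getElem hj1] at hgj
        simp only [List.getElem_map, List.getElem_range]
        simpa using hgj
    rw [hBfin, pv_flatten_singleton]
    -- both sides are the same gather map
    congr 1
    rw [hPdef, List.length_map, List.length_range]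
    refine List.map_congr_left fun t ht => ?_
    simp only [List.mem_range] at ht
    have hgetP : P.getD t 0 = ((pvRowN Rn cy t : Nat) : Int) := by
      simp only [hPdef, List.getD_eq_getElem?_getD, List.getElem?_map]
      simp [ht]
    have htake : P.take t = (List.range t).map (fun j => (pvRowN Rn cy j : Int)) := by
      rw [hPdef, ← List.map_take, List.take_range, Nat.min_eq_left (by omega : t ≤ n)]
    rw [hgetP, hptr0get _ (pv_row_lt Rn cy h2 rfl t), pv_nsum_start, htake, pv_count_filter]
    congr 1

-- ===== VERDICT (by name: the statement is the Claim_ definition above) =====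
theorem decrypt_zigzag_spec : Claim_equal_decrypt_zigzag := by
  intro ciphertext num_rows _
  unfold Spec_decrypt_zigzag
  exact pv_main ciphertext num_rows
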